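-- pv_equiv track=rewrite | github.com/techeer-sv/Surviving-the-Code | jimin/week2/13305.py | solve
-- ===== SOURCE A (Python) =====
-- def solve(n: int, dist: list, price: list) -> int:
--     result = 0
--     min_price = price[0]
--
--     for i in range(n - 1):
--         if price[i] < min_price:
--             min_price = price[i]
--         result += min_price * dist[i]
--
--     return result
-- ===== SOURCE B (Python) =====
-- def solve(n: int, dist: list, price: list) -> int:
--     # Divide-and-conquer on the cheapest station: the minimum price in
--     # price[:hi] pays for every distance from its first position up to hi;
--     # recurse on the segment to its left.
--     def go(hi: int) -> int:
--         if hi <= 0: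
--             return 0
--         seg = price[:hi]
--         mn = min(seg)
--         m = seg.index(mn)
--         return mn * sum(dist[m:hi]) + go(m)
--
--     return go(n - 1)
-- ===== Notes on version B (the rewrite author's own statement) =====
-- stated objective: alternative
-- what changed: A's fused left-to-right running-minimum scan is replaced by a divide-and-conquer recursion on the position of the cheapest station: the first minimum of price[:hi] pays for all distances from its index to hi, then recurse on the segment to its left.
import Mathlib
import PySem

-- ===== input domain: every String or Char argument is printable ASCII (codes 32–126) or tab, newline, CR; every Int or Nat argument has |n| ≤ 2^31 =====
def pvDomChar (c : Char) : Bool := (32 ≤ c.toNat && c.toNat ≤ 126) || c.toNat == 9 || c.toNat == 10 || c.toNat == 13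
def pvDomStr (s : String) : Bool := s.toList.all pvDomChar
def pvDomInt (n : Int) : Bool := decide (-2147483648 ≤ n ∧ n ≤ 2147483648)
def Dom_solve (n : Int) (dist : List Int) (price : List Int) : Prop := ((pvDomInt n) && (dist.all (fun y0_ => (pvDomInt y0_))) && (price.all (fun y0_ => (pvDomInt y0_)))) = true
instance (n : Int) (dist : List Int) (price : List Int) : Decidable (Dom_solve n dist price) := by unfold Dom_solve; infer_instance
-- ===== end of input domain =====

-- B replaces A's fused running-minimum scan by a divide-and-conquer recursion
-- on the position of the cheapest station; objective: alternative.

-- ===== PORT A =====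
def solve (n : Int) (dist : List Int) (price : List Int) : Int :=
  let step : Int × Int → Int → Int × Int := fun s i =>
    let min_price := if PySem.List.pyGetD price i 0 < s.2 then PySem.List.pyGetD price i 0 else s.2
    (s.1 + min_price * PySem.List.pyGetD dist i 0, min_price)
  ((PySem.List.pyRange 0 (n - 1) 1).foldl step (0, PySem.List.pyGetD price 0 0)).1

-- ===== PORT B =====
-- go(hi): the minimum of price[:hi] pays for dist[m:hi] (m its first index),
-- then recurse on the left segment price[:m].  The none-branches totalize the
-- two PySem primitives; inside Pre_ they are never reached (seg is nonempty).
def goB (dist price : List Int) (hi : Nat) : Int :=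
  if _hhi : hi = 0 then 0
  else
    let seg := PySem.List.slice price none (some (hi : Int))
    match PySem.List.min? seg (fun y => y) with
    | none => 0
    | some mn =>
      match PySem.List.index? seg mn with
      | none => 0
      | some m =>
        mn * (PySem.List.slice dist (some (m : Int)) (some (hi : Int))).sum
          + goB dist price (min m (hi - 1))
termination_by hi
decreasing_by omega

def solve_alt (n : Int) (dist : List Int) (price : List Int) : Int :=
  if n - 1 ≤ 0 then 0 else goB dist price (n - 1).toNat

-- ===== PRECONDITION & SPEC =====
-- Pre_ excludes exactly the inputs where A raises IndexError: empty price
-- (the eager price[0] read) or n-1 exceeding the length of price or dist.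
def Pre_solve (n : Int) (dist : List Int) (price : List Int) : Prop :=
  price ≠ [] ∧ n - 1 ≤ (price.length : Int) ∧ n - 1 ≤ (dist.length : Int)
instance (n : Int) (dist : List Int) (price : List Int) : Decidable (Pre_solve n dist price) := by unfold Pre_solve; infer_instance

def pvWitness_solve : Int × List Int × List Int := (4, [2, 3, 1], [5, 2, 4])

def Spec_solve (n : Int) (dist : List Int) (price : List Int) (out : Int) : Prop := out = solve_alt n dist price
instance (n : Int) (dist : List Int) (price : List Int) (out : Int) : Decidable (Spec_solve n dist price out) := by unfold Spec_solve; infer_instance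

-- ===== CLAIM (what is proved, stated in full; the proofs are below) =====
def Claim_equal_solve : Prop := ∀ (n : Int) (dist : List Int) (price : List Int), Dom_solve n dist price → Pre_solve n dist price → Spec_solve n dist price (solve n dist price)

-- ===== LEMMAS AND PROOFS =====

-- the prefix-minimum table both programs implicitly compute
def accMin : Int → List Int → List Int
  | _, [] => []
  | m, p :: ps => (min m p) :: accMin (min m p) ps

def prefixMins : List Int → List Int
  | [] => []
  | p :: ps => p :: accMin p ps

def sumProd (l ds : List Int) : Int := (l.zip ds).foldl (fun s md => s + md.1 * md.2) 0

lemma sumFold_shift (l : List (Int × Int)) (r : Int) :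
    l.foldl (fun s md => s + md.1 * md.2) r = r + l.foldl (fun s md => s + md.1 * md.2) 0 := by
  induction l generalizing r with
  | nil => simp
  | cons x t ih => simp only [List.foldl_cons]; rw [ih, ih (0 + x.1 * x.2)]; ring

lemma zip_take_right {α β : Type} (l : List α) (ds : List β) :
    l.zip ds = l.zip (ds.take l.length) := by
  induction l generalizing ds with
  | nil => simp
  | cons x t ih =>
    cases ds with
    | nil => simp
    | cons d dt => simp [List.zip_cons_cons, ih dt]

lemma accMin_length (m : Int) (l : List Int) : (accMin m l).length = l.length := by
  induction l generalizing m with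
  | nil => rfl
  | cons p t ih => simp [accMin, ih]

lemma prefixMins_length (l : List Int) : (prefixMins l).length = l.length := by
  cases l with
  | nil => rfl
  | cons p t => simp [prefixMins, accMin_length]

-- ===== A-side: the fused loop equals sumProd of the prefix-minimum table =====

lemma loopA_eq (l : List (Int × Int)) (r m : Int) :
    (l.foldl (fun (s : Int × Int) pd =>
        (s.1 + (if pd.1 < s.2 then pd.1 else s.2) * pd.2,
         if pd.1 < s.2 then pd.1 else s.2)) (r, m)).1
    = r + ((accMin m (l.map Prod.fst)).zip (l.map Prod.snd)).foldl
        (fun s md => s + md.1 * md.2) 0 := by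
  induction l generalizing r m with
  | nil => simp
  | cons pd t ih =>
    have hmin : (if pd.1 < m then pd.1 else m) = min m pd.1 := by
      split_ifs with h <;> omega
    simp only [List.foldl_cons, List.map_cons, accMin, List.zip_cons_cons]
    rw [ih, hmin, sumFold_shift _ (0 + min m pd.1 * pd.2)]
    ring

lemma foldl_range_two {σ : Type} (f : σ → Int → Int → σ) (ps ds : List Int) :
    ∀ (k : Nat), k ≤ ps.length → k ≤ ds.length → ∀ (init : σ),
    (PySem.List.pyRange 0 (k : Int) 1).foldl
        (fun s i => f s (PySem.List.pyGetD ps i 0) (PySem.List.pyGetD ds i 0)) init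
    = ((ps.take k).zip (ds.take k)).foldl (fun s pd => f s pd.1 pd.2) init := by
  intro k
  induction k with
  | zero => intro _ _ init; simp [PySem.List.pyRange_one_eq_nil]
  | succ k ih =>
    intro hp hd init
    have hp' : k ≤ ps.length := Nat.le_of_succ_le hp
    have hd' : k ≤ ds.length := Nat.le_of_succ_le hd
    have hcast : ((k + 1 : Nat) : Int) = (k : Int) + 1 := by push_cast; ring
    rw [hcast, PySem.List.pyRange_one_succ_right (by positivity : (0:Int) ≤ (k:Int)),
        List.foldl_append]
    have hps : ps.take (k + 1) = ps.take k ++ [ps[k]'(by omega)] := by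
      rw [List.take_add_one]; simp [List.getElem?_eq_getElem (by omega : k < ps.length)]
    have hds : ds.take (k + 1) = ds.take k ++ [ds[k]'(by omega)] := by
      rw [List.take_add_one]; simp [List.getElem?_eq_getElem (by omega : k < ds.length)]
    have hlen : (ps.take k).length = (ds.take k).length := by
      simp [List.length_take, Nat.min_eq_left hp', Nat.min_eq_left hd']
    rw [hps, hds, List.zip_append hlen, List.foldl_append, ih hp' hd']
    simp [PySem.List.pyGetD_natCast, List.getD_eq_getElem?_getD,
          List.getElem?_eq_getElem (by omega : k < ps.length),
          List.getElem?_eq_getElem (by omega : k < ds.length)]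

lemma prefixMins_eq_accMin_head (p : Int) (t : List Int) :
    prefixMins (p :: t) = accMin p (p :: t) := by
  simp [prefixMins, accMin, min_self]

lemma solve_eq_sumProd (n : Int) (dist price : List Int)
    (hne : price ≠ []) (hp : n - 1 ≤ (price.length : Int)) (hd : n - 1 ≤ (dist.length : Int)) :
    solve n dist price = sumProd (prefixMins (price.take (n - 1).toNat)) dist := by
  simp only [solve]
  set k : Nat := (n - 1).toNat with hk
  have hrange : PySem.List.pyRange 0 (n - 1) 1 = PySem.List.pyRange 0 (k : Int) 1 := by
    by_cases h : 0 ≤ n - 1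
    · congr 1; omega
    · rw [PySem.List.pyRange_one_eq_nil (by omega), PySem.List.pyRange_one_eq_nil (by omega)]
  have hkp : k ≤ price.length := by omega
  have hkd : k ≤ dist.length := by omega
  simp only [hrange]
  rw [foldl_range_two
        (fun (s : Int × Int) p d =>
          (s.1 + (if p < s.2 then p else s.2) * d,
           if p < s.2 then p else s.2)) price dist k hkp hkd]
  rw [loopA_eq]
  have hmins : prefixMins (price.take k) = accMin (PySem.List.pyGetD price 0 0) (price.take k) := by
    cases hpl : price with
    | nil => exact absurd hpl hne
    | cons p t =>
      cases k with
      | zero => simp [prefixMins, accMin]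
      | succ j =>
        simp only [List.take_succ_cons]
        rw [show PySem.List.pyGetD (p :: t) 0 0 = p by simp [pysem]]
        exact prefixMins_eq_accMin_head p (t.take j)
  have hmapf : ((price.take k).zip (dist.take k)).map Prod.fst = price.take k := by
    apply List.map_fst_zip; simp; omega
  have hmaps : ((price.take k).zip (dist.take k)).map Prod.snd = dist.take k := by
    apply List.map_snd_zip; simp; omega
  rw [hmapf, hmaps, ← hmins]
  rw [sumProd, zip_take_right (prefixMins (price.take k)) dist,
      prefixMins_length, List.length_take, Nat.min_eq_left hkp]
  ring

-- ===== B-side: goB equals sumProd of the same table =====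

lemma accMin_all_le (a : Int) (l : List Int) (h : ∀ x ∈ l, a ≤ x) :
    accMin a l = List.replicate l.length a := by
  induction l with
  | nil => rfl
  | cons p t ih =>
    have hap : min a p = a := min_eq_left (h p (by simp))
    simp [accMin, hap, List.replicate, ih (fun x hx => h x (by simp [hx]))]

lemma accMin_append (a : Int) (l1 l2 : List Int) :
    accMin a (l1 ++ l2) = accMin a l1 ++ accMin (l1.foldl min a) l2 := by
  induction l1 generalizing a with
  | nil => simp [accMin]
  | cons p t ih => simp [accMin, ih]

lemma foldl_min_lt (mn : Int) (l : List Int) (a : Int)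
    (ha : mn < a) (hl : ∀ x ∈ l, mn < x) : mn < l.foldl min a := by
  induction l generalizing a with
  | nil => exact ha
  | cons p t ih =>
    exact ih (min a p) (lt_min ha (hl p (by simp))) (fun x hx => hl x (by simp [hx]))

lemma prefixMins_split (pre suf : List Int) (mn : Int)
    (hpre : ∀ x ∈ pre, mn < x) (hsuf : ∀ x ∈ suf, mn ≤ x) :
    prefixMins (pre ++ mn :: suf)
      = prefixMins pre ++ mn :: List.replicate suf.length mn := by
  cases pre with
  | nil =>
    simp [prefixMins, accMin_all_le mn suf hsuf]
  | cons p t =>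
    have hmp : mn < p := hpre p (by simp)
    have hfold : mn < t.foldl min p :=
      foldl_min_lt mn t p hmp (fun x hx => hpre x (by simp [hx]))
    simp only [List.cons_append, prefixMins, accMin_append]
    rw [show accMin (t.foldl min p) (mn :: suf)
          = mn :: List.replicate suf.length mn by
        simp [accMin, min_eq_right (le_of_lt hfold),
              accMin_all_le mn suf hsuf]]

lemma sumProd_replicate (mn : Int) : ∀ (c : Nat) (ds : List Int),
    sumProd (List.replicate c mn) ds = mn * (ds.take c).sum := by
  intro c
  induction c with
  | zero => intro ds; simp [sumProd]
  | succ c ih =>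
    intro ds
    cases ds with
    | nil => simp [sumProd]
    | cons d dt =>
      simp only [List.replicate, List.take_succ_cons, sumProd, List.zip_cons_cons,
                 List.foldl_cons]
      rw [sumFold_shift, ← sumProd, ih dt, List.sum_cons]
      ring

lemma sumProd_cons (x d : Int) (l ds : List Int) :
    sumProd (x :: l) (d :: ds) = x * d + sumProd l ds := by
  simp only [sumProd, List.zip_cons_cons, List.foldl_cons]
  rw [sumFold_shift]
  ring

lemma sumProd_append (l1 l2 ds : List Int) :
    sumProd (l1 ++ l2) ds = sumProd l1 ds + sumProd l2 (ds.drop l1.length) := by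
  induction l1 generalizing ds with
  | nil => simp [sumProd]
  | cons x t ih =>
    cases ds with
    | nil => simp [sumProd]
    | cons d dt =>
      simp only [List.cons_append, List.length_cons, List.drop_succ_cons]
      rw [sumProd_cons, sumProd_cons, ih dt]
      ring

lemma goB_eq_sumProd (dist price : List Int) : ∀ (hi : Nat), hi ≤ price.length →
    goB dist price hi = sumProd (prefixMins (price.take hi)) dist := by
  intro hi
  induction hi using Nat.strong_induction_on with
  | _ hi ih =>
    intro hhi
    by_cases h0 : hi = 0
    · subst h0; simp [goB, sumProd, prefixMins]
    · rw [goB]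
      simp only [h0, dite_false]
      have hseg : PySem.List.slice price none (some (hi : Int)) = price.take hi :=
        PySem.List.slice_to_natCast price hi
      rw [hseg]
      have hne : price.take hi ≠ [] := by
        have hlen : (price.take hi).length = hi := by
          simp [List.length_take]; omega
        intro h
        rw [h] at hlen
        simp at hlen
        omega
      obtain ⟨mn, hmn⟩ : ∃ mn, PySem.List.min? (price.take hi) (fun y => y) = some mn := by
        cases hcase : PySem.List.min? (price.take hi) (fun y => y) with
        | none => exact absurd ((PySem.List.min?_eq_none_iff _ _).mp hcase) hne
        | some mn => exact ⟨mn, rfl⟩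
      have hmem : mn ∈ price.take hi := PySem.List.min?_mem hmn
      obtain ⟨m, hm⟩ : ∃ m, PySem.List.index? (price.take hi) mn = some m := by
        cases hcase : PySem.List.index? (price.take hi) mn with
        | none => exact absurd ((PySem.List.index?_eq_none_iff _ _).mp hcase) (by simp [hmem])
        | some m => exact ⟨m, rfl⟩
      simp only [hmn, hm]
      obtain ⟨pre, suf, hdecomp, hlenpre, hnotpre⟩ :=
        (PySem.List.index?_eq_some_iff _ _ _).mp hm
      have hmin : ∀ y ∈ price.take hi, mn ≤ y := by
        intro y hy; simpa using PySem.List.min?_isMin hmn y hy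
      have hlenseg : (price.take hi).length = hi := by
        simp [List.length_take]; omega
      have hm_lt : m < hi := by
        have : (price.take hi).length = pre.length + 1 + suf.length := by
          rw [hdecomp]; simp; omega
        omega
      have hmineq : min m (hi - 1) = m := by omega
      rw [hmineq]
      have hhi_split : hi = m + 1 + suf.length := by
        have : (price.take hi).length = pre.length + 1 + suf.length := by
          rw [hdecomp]; simp; omega
        omega
      -- pre is price.take m
      have hpre_eq : price.take m = pre := by
        have : (price.take hi).take m = pre := by
          rw [hdecomp, ← hlenpre, List.take_append]
          simp
        rwa [List.take_take, Nat.min_eq_left (by omega)] at this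
      have hpre_lt : ∀ x ∈ pre, mn < x := by
        intro x hx
        have hle : mn ≤ x := hmin x (by rw [hdecomp]; simp [hx])
        have hne' : x ≠ mn := fun h => hnotpre (h ▸ hx)
        omega
      have hsuf_le : ∀ x ∈ suf, mn ≤ x := by
        intro x hx; exact hmin x (by rw [hdecomp]; simp [hx])
      -- split the table
      rw [hdecomp, prefixMins_split pre suf mn hpre_lt hsuf_le,
          show (prefixMins pre ++ mn :: List.replicate suf.length mn)
             = prefixMins pre ++ List.replicate (suf.length + 1) mn by
            simp [List.replicate_succ],
          sumProd_append, prefixMins_length, hlenpre]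
      rw [ih m hm_lt (by omega), hpre_eq, sumProd_replicate]
      have hslice : PySem.List.slice dist (some (m : Int)) (some (hi : Int))
          = (dist.drop m).take (hi - m) := PySem.List.slice_natCast dist m hi
      rw [hslice]
      have : hi - m = suf.length + 1 := by omega
      rw [this]
      ring

-- ===== VERDICT (by name: the statement is the Claim_ definition above) =====
theorem solve_spec : Claim_equal_solve := by
  intro n dist price _ hpre
  obtain ⟨hne, hp, hd⟩ := hpre
  unfold Spec_solve solve_alt
  rw [solve_eq_sumProd n dist price hne hp hd]
  by_cases hk : n - 1 ≤ 0
  · have : (n - 1).toNat = 0 := by omega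
    simp [hk, this, sumProd, prefixMins]
  · simp only [hk, if_false]
    rw [goB_eq_sumProd dist price (n - 1).toNat (by omega)]
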